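-- pv_equiv track=rewrite | github.com/mecthew/LeetcodeTop100 | dweek52/5212. Sum of Floored Pairs.py | sumOfFlooredPairs
-- ===== SOURCE A (Python) =====
-- from typing import List
--
-- def sumOfFlooredPairs(nums: List[int]) -> int:
--     max_num = max(nums)
--     cnt = [0] * (max_num + 1)
--     for num in nums:
--         cnt[num] += 1
--
--     pre = [0] * (max_num + 1)
--     for i in range(1, max_num + 1):
--         pre[i] = pre[i-1] + cnt[i]
--
--     total = 0
--     for y in range(1, max_num + 1):
--         if cnt[y]:
--             d = 1
--             while d * y <= max_num:
--                 total += cnt[y] * d * (pre[min(max_num, (d+1) * y - 1)] - pre[d*y - 1])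
--                 d += 1
--     return total % (10**9 + 7)
-- ===== SOURCE B (Python) =====
-- from typing import List
--
-- def sumOfFlooredPairs(nums: List[int]) -> int:
--     cnt = [0] * (max(nums) + 1)
--     for num in nums:
--         cnt[num] += 1
--
--     total = 0
--     for y in range(1, len(cnt)):
--         if cnt[y]:
--             for x in range(len(cnt)):
--                 total += cnt[y] * cnt[x] * (x // y)
--     return total % (10 ** 9 + 7)
-- ===== Notes on version B (the rewrite author's own statement) =====
-- stated objective: simpler
-- what changed: B keeps only the counting array and replaces A's prefix-sum array plus the harmonic while-loop over quotient buckets (weighted range differences with min-clamping) by a direct double loop over value pairs, accumulating cnt[y]*cnt[x]*(x//y); no prefix sums, no bucket decomposition.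
-- outside the precondition, e.g. on sumOfFlooredPairs([]): A raises ValueError, B raises ValueError; on sumOfFlooredPairs([-1]): A raises IndexError, B raises IndexError
import Mathlib
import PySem

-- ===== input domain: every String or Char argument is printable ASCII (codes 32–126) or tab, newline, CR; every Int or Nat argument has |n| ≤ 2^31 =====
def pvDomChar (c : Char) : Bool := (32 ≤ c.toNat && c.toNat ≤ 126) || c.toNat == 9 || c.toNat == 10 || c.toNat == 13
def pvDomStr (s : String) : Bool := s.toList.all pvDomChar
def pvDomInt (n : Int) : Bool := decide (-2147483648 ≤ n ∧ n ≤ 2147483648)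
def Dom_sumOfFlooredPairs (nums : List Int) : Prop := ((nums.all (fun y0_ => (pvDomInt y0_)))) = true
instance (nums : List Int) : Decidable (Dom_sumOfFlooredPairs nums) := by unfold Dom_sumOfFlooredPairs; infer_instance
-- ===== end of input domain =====

-- B keeps only the counting array and replaces A's prefix sums + harmonic bucket loop by a direct
-- double loop over value pairs accumulating cnt[y]*cnt[x]*(x//y); equivalence is proved on the
-- inputs where the Python A returns (elsewhere both raise).

-- ===== PORT A =====
-- hand-ported helpers used by both ports: Python's xs[i] read / 'xs[i] = v' write on an Array
-- (exact: they compute PySem.List.pyGetD / pySetD on xs.toList — bridge lemmas pyAGetD_eq /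
-- toList_pyASetD below — but in O(1), so the ports evaluate fast)
def pyAGetD (xs : Array Int) (i : Int) (d : Int) : Int :=
  match PySem.List.pyIdx? xs.size i with
  | some k => xs.getD k d
  | none => d

def pyASetD (xs : Array Int) (i : Int) (v : Int) : Array Int :=
  match PySem.List.pyIdx? xs.size i with
  | some k => xs.setIfInBounds k v
  | none => xs

-- inner 'while d * y <= max_num' loop of A; fuel bounds the iteration count (max_num.toNat suffices for 1 ≤ y)
def aWhile (fuel : Nat) (d y maxNum : Int) (cnt pre : Array Int) (total : Int) : Int :=
  match fuel with
  | 0 => total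
  | Nat.succ f =>
    if d * y ≤ maxNum then
      aWhile f (d + 1) y maxNum cnt pre
        (total + pyAGetD cnt y 0 * d *
          (pyAGetD pre (min maxNum ((d + 1) * y - 1)) 0 -
           pyAGetD pre (d * y - 1) 0))
    else total

def sumOfFlooredPairs (nums : List Int) : Int :=
  match PySem.List.max? nums (fun x => x) with
  | none => 0  -- max([]) raises ValueError; excluded by Pre_
  | some maxNum =>
    let cnt := nums.foldl
      (fun c num => pyASetD c num (pyAGetD c num 0 + 1))
      (Array.replicate (maxNum + 1).toNat 0)
    let pre := (PySem.List.pyRange 1 (maxNum + 1) 1).foldl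
      (fun p i => pyASetD p i
        (pyAGetD p (i - 1) 0 + pyAGetD cnt i 0))
      (Array.replicate (maxNum + 1).toNat 0)
    let total := (PySem.List.pyRange 1 (maxNum + 1) 1).foldl
      (fun tot y =>
        if pyAGetD cnt y 0 ≠ 0 then
          aWhile maxNum.toNat 1 y maxNum cnt pre tot
        else tot) 0
    PySem.Int.mod total 1000000007

-- ===== PORT B =====
def sumOfFlooredPairs_alt (nums : List Int) : Int :=
  match PySem.List.max? nums (fun x => x) with
  | none => 0  -- max([]) raises ValueError; excluded by Pre_
  | some maxNum =>
    let cnt := nums.foldl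
      (fun c num => pyASetD c num (pyAGetD c num 0 + 1))
      (Array.replicate (maxNum + 1).toNat 0)
    let total := (PySem.List.pyRange 1 (cnt.size : Int) 1).foldl
      (fun tot y =>
        if pyAGetD cnt y 0 ≠ 0 then
          (PySem.List.pyRange 0 (cnt.size : Int) 1).foldl
            (fun t x => t + pyAGetD cnt y 0 * pyAGetD cnt x 0 * PySem.Int.floordiv x y) tot
        else tot) 0
    PySem.Int.mod total 1000000007

-- ===== PRECONDITION & SPEC =====
-- Pre_ excludes exactly the inputs where the Python raises (A and B alike, since both build the same
-- cnt list): the empty list (max([]) is a ValueError) and lists with an element below -(max+1),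
-- where cnt[num] += 1 is an IndexError (this also covers all-negative lists, whose cnt array is empty).
def Pre_sumOfFlooredPairs (nums : List Int) : Prop :=
  nums ≠ [] ∧ ∀ x ∈ nums, -(((PySem.List.max? nums (fun y => y)).getD 0) + 1) ≤ x
instance (nums : List Int) : Decidable (Pre_sumOfFlooredPairs nums) := by
  unfold Pre_sumOfFlooredPairs; infer_instance
def pvWitness_sumOfFlooredPairs : List Int := [2, 5, 9, 7]
def Spec_sumOfFlooredPairs (nums : List Int) (out : Int) : Prop := out = sumOfFlooredPairs_alt nums
instance (nums : List Int) (out : Int) : Decidable (Spec_sumOfFlooredPairs nums out) := by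
  unfold Spec_sumOfFlooredPairs; infer_instance

-- ===== CLAIM (what is proved, stated in full; the proofs are below) =====
def Claim_equal_sumOfFlooredPairs : Prop := ∀ (nums : List Int), Dom_sumOfFlooredPairs nums → Pre_sumOfFlooredPairs nums → Spec_sumOfFlooredPairs nums (sumOfFlooredPairs nums)

-- ===== LEMMAS AND PROOFS =====

-- prefix sums of the cnt array: pvP cnt j = cnt[1] + ... + cnt[j]  (what A's pre[j] holds)
def pvP (cnt : List Int) : Nat → Int
  | 0 => 0
  | n + 1 => pvP cnt n + cnt.getD (n + 1) 0

lemma getD_set_ne (xs : List Int) (i j : Nat) (v : Int) (h : j ≠ i) :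
    (xs.set i v).getD j 0 = xs.getD j 0 := by
  simp [List.getD, List.getElem?_set_ne (by omega : i ≠ j)]

lemma getD_set_self (xs : List Int) (i : Nat) (v : Int) (h : i < xs.length) :
    (xs.set i v).getD i 0 = v := by
  simp [List.getD, h]

lemma pre_inv (cnt : List Int) (N : Nat) :
    ∀ k : Nat, k ≤ N + 1 →
      (((PySem.List.pyRange 1 (k : Int) 1).foldl
          (fun p i => PySem.List.pySetD p i
            (PySem.List.pyGetD p (i - 1) 0 + PySem.List.pyGetD cnt i 0))
          (List.replicate (N + 1) (0:Int))).length = N + 1) ∧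
      (∀ j : Nat, j < N + 1 →
        ((PySem.List.pyRange 1 (k : Int) 1).foldl
          (fun p i => PySem.List.pySetD p i
            (PySem.List.pyGetD p (i - 1) 0 + PySem.List.pyGetD cnt i 0))
          (List.replicate (N + 1) (0:Int))).getD j 0 = if j < k then pvP cnt j else 0) := by
  intro k
  induction k with
  | zero =>
    intro _
    rw [PySem.List.pyRange_one_eq_nil (by norm_num)]
    refine ⟨by simp, ?_⟩
    intro j hj
    simp
  | succ k ih =>
    intro hk
    by_cases hk0 : k = 0
    · subst hk0
      rw [show ((0 + 1 : Nat) : Int) = 1 by norm_num,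
          PySem.List.pyRange_one_eq_nil (by norm_num)]
      refine ⟨by simp, ?_⟩
      intro j hj
      rcases Nat.lt_or_ge j 1 with h1 | h1
      · interval_cases j
        simp [pvP]
      · simp [Nat.not_lt.mpr h1]
    · have hk1 : 1 ≤ k := Nat.one_le_iff_ne_zero.mpr hk0
      have hkN : k ≤ N + 1 := Nat.le_of_succ_le hk
      obtain ⟨hlen, hval⟩ := ih hkN
      rw [show ((k + 1 : Nat) : Int) = (k : Int) + 1 by push_cast; ring,
          PySem.List.pyRange_one_succ_right (by exact_mod_cast hk1), List.foldl_append]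
      set r := (PySem.List.pyRange 1 (k : Int) 1).foldl
          (fun p i => PySem.List.pySetD p i
            (PySem.List.pyGetD p (i - 1) 0 + PySem.List.pyGetD cnt i 0))
          (List.replicate (N + 1) (0:Int)) with hr
      simp only [List.foldl_cons, List.foldl_nil]
      have hcast1 : (k : Int) - 1 = ((k - 1 : Nat) : Int) := by omega
      have hkltN : k < N + 1 := by omega
      rw [hcast1, PySem.List.pyGetD_natCast, PySem.List.pyGetD_natCast,
          PySem.List.pySetD_natCast]
      have hv : r.getD (k - 1) 0 + cnt.getD k 0 = pvP cnt k := by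
        rw [hval (k - 1) (by omega)]
        simp only [if_pos (by omega : k - 1 < k)]
        have : k = (k - 1) + 1 := by omega
        rw [this]
        simp [pvP]
      constructor
      · simp [List.length_set, hlen]
      · intro j hj
        by_cases hjk : j = k
        · subst hjk
          rw [getD_set_self _ _ _ (by omega), hv, if_pos (by omega)]
        · rw [getD_set_ne _ _ _ _ hjk, hval j hj]
          by_cases h2 : j < k
          · rw [if_pos h2, if_pos (by omega)]
          · rw [if_neg h2, if_neg (by omega)]

-- bridges: the Array helpers compute exactly PySem's Python indexing on toList
lemma pyAGetD_eq (xs : Array Int) (i d : Int) : pyAGetD xs i d = PySem.List.pyGetD xs.toList i d := by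
  unfold pyAGetD PySem.List.pyGetD PySem.List.pyGet?
  rw [Array.length_toList]
  cases h : PySem.List.pyIdx? xs.size i with
  | none => simp
  | some k =>
    by_cases hk : k < xs.size
    · simp [Array.getD, hk]
    · simp [Array.getD, hk]

lemma toList_pyASetD (xs : Array Int) (i v : Int) :
    (pyASetD xs i v).toList = PySem.List.pySetD xs.toList i v := by
  unfold pyASetD PySem.List.pySetD PySem.List.pySet?
  rw [Array.length_toList]
  cases h : PySem.List.pyIdx? xs.size i with
  | none => simp
  | some k => simp [Array.toList_setIfInBounds]

lemma pyASetD_size (xs : Array Int) (i v : Int) : (pyASetD xs i v).size = xs.size := by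
  unfold pyASetD
  cases h : PySem.List.pyIdx? xs.size i <;> simp

-- foldl commutes with toList when the step functions do
lemma foldl_toList (l : List Int) (sA : Array Int → Int → Array Int)
    (sL : List Int → Int → List Int) (h : ∀ a x, (sA a x).toList = sL a.toList x) :
    ∀ init : Array Int, (l.foldl sA init).toList = l.foldl sL init.toList := by
  induction l with
  | nil => intro init; rfl
  | cons x t ih => intro init; simp only [List.foldl_cons]; rw [ih, h]

lemma cnt_size (nums : List Int) (f : Int → Int → Int) :
    ∀ (a : Array Int), (nums.foldl (fun c num => pyASetD c num (f (pyAGetD c num 0) num)) a).size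
      = a.size := by
  induction nums with
  | nil => intro a; rfl
  | cons x t ih => intro a; simp only [List.foldl_cons]; rw [ih, pyASetD_size]

lemma aWhile_eq (y maxNum : Int) (hy : 1 ≤ y) (cnt pre : Array Int) :
    ∀ (fuel : Nat) (d tot : Int),
      PySem.Int.floordiv maxNum y + 1 ≤ d + fuel →
      aWhile fuel d y maxNum cnt pre tot
        = tot + ((PySem.List.pyRange d (PySem.Int.floordiv maxNum y + 1) 1).map
            (fun j => pyAGetD cnt y 0 * j *
              (pyAGetD pre (min maxNum ((j + 1) * y - 1)) 0 -
               pyAGetD pre (j * y - 1) 0))).sum := by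
  intro fuel
  induction fuel with
  | zero =>
    intro d tot hb
    rw [PySem.List.pyRange_one_eq_nil (by push_cast at hb ⊢; omega)]
    simp [aWhile]
  | succ f ih =>
    intro d tot hb
    rw [aWhile]
    by_cases h : d * y ≤ maxNum
    · have hdK : d ≤ PySem.Int.floordiv maxNum y :=
        (PySem.Int.le_floordiv_iff_mul_le (by omega)).mpr h
      rw [if_pos h, PySem.List.pyRange_one_cons (by omega), List.map_cons, List.sum_cons,
          ih (d + 1) _ (by push_cast at hb ⊢; omega)]
      ring
    · have hKd : PySem.Int.floordiv maxNum y < d := by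
        by_contra hc
        exact h ((PySem.Int.le_floordiv_iff_mul_le (by omega)).mp (by omega))
      rw [if_neg h, PySem.List.pyRange_one_eq_nil (by omega)]
      simp

lemma abel_sum (Q : Int → Int) (c : Int) :
    ∀ K : Nat,
      ((List.range K).map (fun k : Nat => c * ((k : Int) + 1) * (Q ((k : Int) + 2) - Q ((k : Int) + 1)))).sum
        = c * ((List.range K).map (fun k : Nat => Q ((K : Int) + 1) - Q ((k : Int) + 1))).sum := by
  intro K
  induction K with
  | zero => simp
  | succ K ih =>
    rw [List.range_succ, List.map_append, List.map_append, List.sum_append, List.sum_append, ih]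
    simp only [List.map_cons, List.map_nil, List.sum_cons, List.sum_nil]
    have key : ((List.range K).map (fun k : Nat => Q (((K + 1 : Nat) : Int) + 1) - Q ((k : Int) + 1))).sum
        = ((List.range K).map (fun k : Nat => Q ((K : Int) + 1) - Q ((k : Int) + 1))).sum
          + (K : Int) * (Q ((K : Int) + 2) - Q ((K : Int) + 1)) := by
      have h1 : ∀ k ∈ List.range K,
          Q (((K + 1 : Nat) : Int) + 1) - Q ((k : Int) + 1)
            = (Q ((K : Int) + 1) - Q ((k : Int) + 1)) + (Q ((K : Int) + 2) - Q ((K : Int) + 1)) := by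
        intro k _
        rw [show (((K + 1 : Nat) : Int) + 1) = (K : Int) + 2 by push_cast; ring]
        ring
      rw [List.map_congr_left h1, PySem.List.sum_map_add_int, PySem.List.sum_map_const_int]
      simp
    rw [key, show (((K + 1 : Nat) : Int) + 1) = (K : Int) + 2 by push_cast; ring,
        show ((K : Nat) : Int) + 2 = (K : Int) + 2 by ring,
        show ((K : Nat) : Int) + 1 = (K : Int) + 1 by ring]
    ring

-- bridge: a List.range sum is a Finset.range sum
lemma sum_list_range (f : Nat → Int) (n : Nat) :
    ((List.range n).map f).sum = ∑ i ∈ Finset.range n, f i := by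
  induction n with
  | zero => simp
  | succ n ih => rw [List.range_succ, Finset.sum_range_succ, List.map_append, List.sum_append, ih]; simp

-- pvP as a Finset.Ico sum over indices 1..n
lemma pvP_Ico (cnt : List Int) (n : Nat) :
    pvP cnt n = ∑ x ∈ Finset.Ico 1 (n + 1), cnt.getD x 0 := by
  induction n with
  | zero => simp [pvP]
  | succ n ih =>
    rw [pvP, ih]
    conv_rhs => rw [Finset.sum_Ico_succ_top (by omega : 1 ≤ n + 1)]

lemma pvP_diff (cnt : List Int) (N j : Nat) (hj : j ≤ N) :
    pvP cnt N - pvP cnt j = ∑ x ∈ Finset.Ico (j + 1) (N + 1), cnt.getD x 0 := by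
  rw [pvP_Ico, pvP_Ico,
      ← Finset.sum_Ico_consecutive (fun x => cnt.getD x 0) (by omega : 1 ≤ j + 1) (by omega : j + 1 ≤ N + 1)]
  ring

lemma filter_ge_range (a b : Nat) :
    Finset.filter (fun x => a ≤ x) (Finset.range b) = Finset.Ico a b := by
  ext x
  simp [Finset.mem_filter, Finset.mem_range, Finset.mem_Ico]
  omega

lemma filter_lt_range (t K : Nat) :
    Finset.filter (fun k => k < t) (Finset.range K) = Finset.range (min t K) := by
  ext k
  simp [Finset.mem_filter, Finset.mem_range]
  omega

-- the exchange identity: A's bucket sums over d equal the direct quotient sums over values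
lemma core_exchange (cnt : List Int) (N yn : Nat) (hy : 1 ≤ yn) :
    ((List.range (N / yn)).map (fun k => pvP cnt N - pvP cnt ((k + 1) * yn - 1))).sum
      = ((List.range (N + 1)).map (fun x => cnt.getD x 0 * ((x / yn : Nat) : Int))).sum := by
  rw [sum_list_range, sum_list_range]
  have step1 : ∀ k ∈ Finset.range (N / yn),
      pvP cnt N - pvP cnt ((k + 1) * yn - 1)
        = ∑ x ∈ Finset.range (N + 1), if (k + 1) * yn ≤ x then cnt.getD x 0 else 0 := by
    intro k hk
    have hk' : k < N / yn := Finset.mem_range.mp hk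
    have hmul : (k + 1) * yn ≤ N := (Nat.le_div_iff_mul_le (by omega)).mp (by omega)
    have hpos : 1 ≤ (k + 1) * yn := Nat.one_le_iff_ne_zero.mpr (Nat.mul_ne_zero (by omega) (by omega))
    rw [pvP_diff cnt N ((k + 1) * yn - 1) (by omega),
        show (k + 1) * yn - 1 + 1 = (k + 1) * yn by omega,
        ← filter_ge_range ((k + 1) * yn) (N + 1), Finset.sum_filter]
  rw [Finset.sum_congr rfl step1, Finset.sum_comm]
  apply Finset.sum_congr rfl
  intro x hx
  have hxN : x < N + 1 := Finset.mem_range.mp hx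
  have hiff : ∀ k : Nat, ((k + 1) * yn ≤ x) ↔ (k < x / yn) := by
    intro k
    rw [← Nat.le_div_iff_mul_le (by omega : 0 < yn)]
    omega
  have hfilter : Finset.filter (fun k => (k + 1) * yn ≤ x) (Finset.range (N / yn))
      = Finset.range (x / yn) := by
    rw [Finset.filter_congr (fun k _ => by rw [hiff k] : ∀ k ∈ Finset.range (N / yn), _),
        filter_lt_range]
    congr 1
    have : x / yn ≤ N / yn := Nat.div_le_div_right (by omega)
    omega
  calc (∑ k ∈ Finset.range (N / yn), if (k + 1) * yn ≤ x then cnt.getD x 0 else 0)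
      = ∑ k ∈ Finset.filter (fun k => (k + 1) * yn ≤ x) (Finset.range (N / yn)), cnt.getD x 0 := by
        rw [Finset.sum_filter]
    _ = (x / yn) • cnt.getD x 0 := by rw [hfilter, Finset.sum_const, Finset.card_range]
    _ = cnt.getD x 0 * ((x / yn : Nat) : Int) := by rw [nsmul_eq_mul]; ring

-- per-y: the value A's while loop adds equals the value B's inner loop adds
lemma per_y (cntA preA : Array Int) (cnt : List Int) (N : Nat)
    (hcnt : cntA.toList = cnt)
    (hpre : ∀ j : Nat, j < N + 1 → preA.toList.getD j 0 = pvP cnt j)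
    (y : Int) (hy1 : 1 ≤ y) :
    ((PySem.List.pyRange 1 (PySem.Int.floordiv (N : Int) y + 1) 1).map
        (fun j => pyAGetD cntA y 0 * j *
          (pyAGetD preA (min (N : Int) ((j + 1) * y - 1)) 0 -
           pyAGetD preA (j * y - 1) 0))).sum
      = ((PySem.List.pyRange 0 ((N : Int) + 1) 1).map
          (fun x => pyAGetD cntA y 0 * pyAGetD cntA x 0 * PySem.Int.floordiv x y)).sum := by
  simp only [pyAGetD_eq]
  set pre := preA.toList
  set c := PySem.List.pyGetD cntA.toList y 0 with hc
  set yn := y.toNat with hyn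
  have hycast : (yn : Int) = y := Int.toNat_of_nonneg (by omega)
  set K := PySem.Int.floordiv (N : Int) y with hK
  set KN := N / yn with hKN
  have hKcast : K = (KN : Int) := by
    rw [hK, ← hycast, hKN]
    exact_mod_cast PySem.Int.floordiv_natCast N yn
  have hK0 : 0 ≤ K := by rw [hKcast]; positivity
  have hKy : K * y ≤ (N : Int) := (PySem.Int.le_floordiv_iff_mul_le (by omega)).mp le_rfl
  have hKy2 : (N : Int) < (K + 1) * y := by
    have := (PySem.Int.floordiv_lt_iff_lt_mul (show (0:Int) < y by omega)
      (a := (N : Int)) (q := K + 1)).mp (by omega)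
    exact this
  -- Q j = pre[min N (j*y - 1)] as prefix-sum values
  set Q : Int → Int := fun j => pvP cnt ((min (N : Int) (j * y - 1)).toNat) with hQ
  -- LHS range as List.range KN
  have hL : PySem.List.pyRange 1 (K + 1) 1
      = (List.range KN).map (fun k : Nat => 1 + (k : Int)) := by
    rw [PySem.List.pyRange_one]
    rw [show K + 1 - 1 = K from by ring, hKcast]
    simp
  rw [hL, List.map_map]
  have hLe : ∀ k ∈ List.range KN,
      ((fun j => c * j * (PySem.List.pyGetD pre (min (N : Int) ((j + 1) * y - 1)) 0 -
        PySem.List.pyGetD pre (j * y - 1) 0)) ∘ (fun k : Nat => 1 + (k : Int))) k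
      = c * ((k : Int) + 1) * (Q ((k : Int) + 2) - Q ((k : Int) + 1)) := by
    intro k hk
    have hkK : (k : Int) < K := by
      rw [hKcast]; exact_mod_cast List.mem_range.mp hk
    simp only [Function.comp_apply]
    have hjy : ((k : Int) + 1) * y ≤ (N : Int) := by
      calc ((k : Int) + 1) * y ≤ K * y := by
            apply mul_le_mul_of_nonneg_right (by omega) (by omega)
        _ ≤ (N : Int) := hKy
    have hidx1 : 0 ≤ ((k : Int) + 1) * y - 1 := by nlinarith
    have e1 : PySem.List.pyGetD pre ((1 + (k : Int)) * y - 1) 0 = Q ((k : Int) + 1) := by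
      rw [show (1 + (k : Int)) = ((k : Int) + 1) by ring,
          PySem.List.pyGetD_of_nonneg _ _ hidx1,
          hpre _ (by omega), hQ]
      congr 1
      omega
    have hidx2 : 0 ≤ min (N : Int) (((k : Int) + 2) * y - 1) := by
      apply le_min (by positivity)
      nlinarith
    have e2 : PySem.List.pyGetD pre (min (N : Int) ((1 + (k : Int) + 1) * y - 1)) 0
        = Q ((k : Int) + 2) := by
      rw [show (1 + (k : Int) + 1) = ((k : Int) + 2) by ring,
          PySem.List.pyGetD_of_nonneg _ _ hidx2,
          hpre _ (by omega), hQ]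
    rw [e1, e2]
    ring_nf
  rw [List.map_congr_left hLe, abel_sum Q c KN]
  -- identify Q at the relevant points with pvP values
  have hQK : Q ((KN : Int) + 1) = pvP cnt N := by
    rw [hQ]
    beta_reduce
    rw [← hKcast]
    have : min (N : Int) ((K + 1) * y - 1) = (N : Int) := by omega
    rw [this]
    simp
  have hQk : ∀ k ∈ List.range KN,
      Q ((KN : Int) + 1) - Q ((k : Int) + 1) = pvP cnt N - pvP cnt ((k + 1) * yn - 1) := by
    intro k hk
    have hkK : k < KN := List.mem_range.mp hk
    rw [hQK, hQ]
    beta_reduce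
    have hjy : ((k : Int) + 1) * y = (((k + 1) * yn : Nat) : Int) := by
      rw [← hycast]; push_cast; ring
    have hpos : 1 ≤ (k + 1) * yn := Nat.one_le_iff_ne_zero.mpr (Nat.mul_ne_zero (by omega) (by omega))
    have hmin : min (N : Int) (((k : Int) + 1) * y - 1) = (((k + 1) * yn : Nat) : Int) - 1 := by
      have hle : (((k + 1) * yn : Nat) : Int) ≤ (N : Int) := by
        rw [← hjy]
        calc ((k : Int) + 1) * y ≤ K * y := by
              apply mul_le_mul_of_nonneg_right (by rw [hKcast]; exact_mod_cast hkK) (by omega)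
          _ ≤ (N : Int) := hKy
      rw [hjy]
      omega
    rw [hmin]
    congr 2
    omega
  rw [List.map_congr_left hQk, core_exchange cnt N yn (by omega)]
  -- now rewrite the RHS over pyRange 0 (N+1) into the same List.range sum
  have hR : PySem.List.pyRange 0 ((N : Int) + 1) 1
      = (List.range (N + 1)).map (fun x : Nat => (x : Int)) := by
    rw [show ((N : Int) + 1) = ((N + 1 : Nat) : Int) by push_cast; ring]
    exact PySem.List.pyRange_zero_nat (N + 1)
  rw [hR, List.map_map]
  have hRe : ∀ x ∈ List.range (N + 1),
      ((fun x => c * PySem.List.pyGetD cntA.toList x 0 * PySem.Int.floordiv x y) ∘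
        (fun x : Nat => (x : Int))) x
      = c * (cnt.getD x 0 * ((x / yn : Nat) : Int)) := by
    intro x hx
    simp only [Function.comp_apply]
    rw [hcnt, PySem.List.pyGetD_natCast, ← hycast, PySem.Int.floordiv_natCast]
    ring
  rw [List.map_congr_left hRe]
  induction (List.range (N + 1)) with
  | nil => simp
  | cons h t iht =>
    simp only [List.map_cons, List.sum_cons, mul_add, iht]

-- ===== VERDICT (by name: the statement is the Claim_ definition above) =====
theorem sumOfFlooredPairs_spec : Claim_equal_sumOfFlooredPairs := by
  intro nums _ hpre
  obtain ⟨hne, hbound⟩ := hpre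
  unfold Spec_sumOfFlooredPairs sumOfFlooredPairs sumOfFlooredPairs_alt
  cases hmax : PySem.List.max? nums (fun x => x) with
  | none => exact absurd ((PySem.List.max?_eq_none_iff nums _).mp hmax) hne
  | some M =>
    have hMmem : M ∈ nums := PySem.List.max?_mem hmax
    have hbound' := hbound M hMmem
    rw [hmax] at hbound'
    simp only [Option.getD_some] at hbound'
    have hM0 : 0 ≤ M := by omega
    set N := M.toNat with hN
    have hMN : M = (N : Int) := (Int.toNat_of_nonneg hM0).symm
    rw [hMN]
    simp only [Int.toNat_natCast,
      show ((N : Int) + 1).toNat = N + 1 by omega]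
    set cntA := nums.foldl
      (fun c num => pyASetD c num (pyAGetD c num 0 + 1))
      (Array.replicate (N + 1) (0 : Int)) with hcntA
    set cntL := nums.foldl
      (fun c num => PySem.List.pySetD c num (PySem.List.pyGetD c num 0 + 1))
      (List.replicate (N + 1) (0 : Int)) with hcntL
    have hcnt : cntA.toList = cntL := by
      rw [hcntA, hcntL, ← Array.toList_replicate (n := N + 1) (a := (0 : Int))]
      exact foldl_toList nums _ _ (fun a x => by rw [toList_pyASetD, pyAGetD_eq]) _
    have hsize : (cntA.size : Int) = (N : Int) + 1 := by
      rw [hcntA, cnt_size nums (fun v _ => v + 1)]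
      simp
    rw [hsize]
    set preA := (PySem.List.pyRange 1 ((N : Int) + 1) 1).foldl
      (fun p i => pyASetD p i (pyAGetD p (i - 1) 0 + pyAGetD cntA i 0))
      (Array.replicate (N + 1) (0 : Int)) with hpreA
    have hpreval : ∀ j : Nat, j < N + 1 → preA.toList.getD j 0 = pvP cntL j := by
      intro j hj
      have hfold : preA.toList = (PySem.List.pyRange 1 ((N : Int) + 1) 1).foldl
          (fun p i => PySem.List.pySetD p i
            (PySem.List.pyGetD p (i - 1) 0 + PySem.List.pyGetD cntL i 0))
          (List.replicate (N + 1) (0 : Int)) := by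
        rw [hpreA, ← Array.toList_replicate (n := N + 1) (a := (0 : Int))]
        exact foldl_toList _ _ _
          (fun a x => by rw [toList_pyASetD, pyAGetD_eq, pyAGetD_eq, hcnt]) _
      have h := (pre_inv cntL N (N + 1) le_rfl).2 j hj
      rw [show (((N + 1 : Nat)) : Int) = (N : Int) + 1 by push_cast; ring] at h
      rw [hfold, h, if_pos hj]
    congr 1
    apply PySem.List.foldl_congr_mem
    intro tot y hy
    obtain ⟨hy1, hy2⟩ := PySem.List.mem_pyRange_one.mp hy
    by_cases hg : pyAGetD cntA y 0 ≠ 0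
    · rw [if_pos hg, if_pos hg]
      have hfuel : PySem.Int.floordiv (N : Int) y + 1 ≤ 1 + (N : Nat) := by
        have hlt : PySem.Int.floordiv (N : Int) y < (N : Int) + 1 := by
          rw [PySem.Int.floordiv_lt_iff_lt_mul (by omega)]
          nlinarith
        omega
      rw [aWhile_eq y (N : Int) hy1 cntA preA N 1 tot hfuel,
          per_y cntA preA cntL N hcnt hpreval y hy1,
          PySem.List.foldl_add]
    · rw [if_neg hg, if_neg hg]
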